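-- pv_equiv track=rewrite | github.com/superquinquin/Scannettes | application/packages/utils.py | order_files
-- ===== SOURCE A (Python) =====
-- from typing import Dict, Union, Tuple, List
--
-- def order_files(files: List[str]) -> List[str]:
--   """give order for unifying process"""
--   ordered, schema = [], ['config', 'init', 'functions', 'product', 'camera', 'others']
--   for t in schema:
--     for file in files:
--       if t in file:
--         ordered.append(file)
--       if t == "others" and file not in ordered:
--         ordered.append(file)
--
--   return ordered
-- ===== SOURCE B (Python) =====
-- KEYWORDS = ['config', 'init', 'functions', 'product', 'camera']
--
-- def _bucket_add(buckets, file):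
--     for t in KEYWORDS:
--         if t in file:
--             buckets[t].append(file)
--
-- def order_files(files):
--     """give order for unifying process"""
--     keywords = KEYWORDS
--     buckets = {t: [] for t in keywords}
--     for file in files:
--         _bucket_add(buckets, file)
--     ordered = []
--     for t in keywords:
--         ordered.extend(buckets[t])
--     seen = set(ordered)
--     for file in files:
--         if 'others' in file:
--             ordered.append(file)
--         elif file not in seen:
--             ordered.append(file)
--             seen.add(file)
--     return ordered
-- ===== Notes on version B (the rewrite author's own statement) =====
-- stated objective: faster
-- what changed: A scans the whole file list once per schema keyword (keyword-outer) and tests membership by scanning the growing output list; B makes one file-outer pass distributing each file into per-keyword buckets, concatenates the buckets, and does a final pass with a seen-set, removing the linear membership scan.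
import Mathlib
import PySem

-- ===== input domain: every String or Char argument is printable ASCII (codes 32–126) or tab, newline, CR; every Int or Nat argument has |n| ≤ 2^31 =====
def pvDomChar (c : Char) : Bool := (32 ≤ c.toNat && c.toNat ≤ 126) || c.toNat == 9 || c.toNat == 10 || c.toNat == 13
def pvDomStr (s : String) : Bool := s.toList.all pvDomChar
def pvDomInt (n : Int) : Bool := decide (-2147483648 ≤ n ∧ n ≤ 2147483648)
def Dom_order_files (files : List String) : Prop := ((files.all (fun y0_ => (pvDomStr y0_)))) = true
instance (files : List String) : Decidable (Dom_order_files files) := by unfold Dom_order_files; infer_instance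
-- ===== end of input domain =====

-- B replaces A's keyword-outer quadratic scan (list membership inside a loop) by a
-- single bucket-building pass over the files plus a final pass with a seen-set (objective: faster, measured).

-- ===== PORT A =====
def order_files (files : List String) : List String :=
  let schema := ["config", "init", "functions", "product", "camera", "others"]
  schema.foldl (fun ordered t =>
    files.foldl (fun ordered file =>
      let ordered := if PySem.Str.isIn t file then ordered ++ [file] else ordered
      if t == "others" && !(ordered.contains file) then ordered ++ [file] else ordered)
      ordered) []

-- ===== PORT B =====
-- helper (_bucket_add in Source B): append file to the bucket of every keyword it contains
def pvBucketAdd (d : PySem.Dict String (List String)) (file : String) :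
    PySem.Dict String (List String) :=
  (["config", "init", "functions", "product", "camera"] : List String).foldl (fun d t =>
    if PySem.Str.isIn t file then d.modify t [] (fun l => l ++ [file]) else d) d

def order_files_alt (files : List String) : List String :=
  let keywords := ["config", "init", "functions", "product", "camera"]
  let buckets : PySem.Dict String (List String) :=
    keywords.foldl (fun d t => d.insert t []) PySem.Dict.empty
  let buckets := files.foldl pvBucketAdd buckets
  let ordered := keywords.foldl (fun acc t => acc ++ buckets.getD t []) []
  let seen := PySem.Set.ofList ordered
  let res := files.foldl (fun (p : List String × PySem.Set String) file =>
      if PySem.Str.isIn "others" file then (p.1 ++ [file], p.2)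
      else if p.2.contains file then p
      else (p.1 ++ [file], p.2.add file))
    (ordered, seen)
  res.1

-- ===== PRECONDITION & SPEC =====
def Spec_order_files (files : List String) (out : List String) : Prop := out = order_files_alt files
instance (files : List String) (out : List String) : Decidable (Spec_order_files files out) := by unfold Spec_order_files; infer_instance

-- ===== CLAIM (what is proved, stated in full; the proofs are below) =====
def Claim_equal_order_files : Prop := ∀ (files : List String), Dom_order_files files → Spec_order_files files (order_files files)

-- ===== LEMMAS AND PROOFS =====

-- A's inner loop for a keyword other than "others" just appends the matching files.
theorem pv_phase1 (t : String) (ht : (t == "others") = false) (files : List String)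
    (acc : List String) :
    files.foldl (fun ordered file =>
      let ordered := if PySem.Str.isIn t file then ordered ++ [file] else ordered
      if t == "others" && !(ordered.contains file) then ordered ++ [file] else ordered)
      acc = acc ++ files.filter (fun f => PySem.Str.isIn t f) := by
  have h : (fun (ordered : List String) file =>
      let ordered := if PySem.Str.isIn t file then ordered ++ [file] else ordered
      if t == "others" && !(ordered.contains file) then ordered ++ [file] else ordered)
      = fun ordered file => if PySem.Str.isIn t file then ordered ++ [file] else ordered := by
    funext o f; simp [ht]
  rw [h, PySem.List.foldl_append_if_eq_filter]

-- one file's pass over the literal keyword list, seen through getD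
theorem pv_kwstep (file : String) (d : PySem.Dict String (List String)) (u : String)
    (hu : u ∈ ["config", "init", "functions", "product", "camera"]) :
    (pvBucketAdd d file).getD u []
      = d.getD u [] ++ (if PySem.Str.isIn u file then [file] else []) := by
  fin_cases hu <;>
    simp only [pvBucketAdd] <;>
    simp only [List.foldl] <;>
    split_ifs <;>
    simp_all [PySem.Dict.getD_modify]

-- the bucket built by B's first pass is the filter
theorem pv_bucket (u : String)
    (hu : u ∈ ["config", "init", "functions", "product", "camera"]) (files : List String)
    (d : PySem.Dict String (List String)) :
    (files.foldl pvBucketAdd d).getD u []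
      = d.getD u [] ++ files.filter (fun f => PySem.Str.isIn u f) := by
  induction files generalizing d with
  | nil => simp
  | cons file rest ih =>
    rw [List.foldl_cons, ih, pv_kwstep file d u hu, List.filter_cons]
    cases h : PySem.Str.isIn u file
    · simp
    · simp

-- A's step in the "others" round, with the literal test simplified away
theorem pv_stepA_eq :
    (fun (ordered : List String) file =>
      let ordered := if PySem.Str.isIn "others" file then ordered ++ [file] else ordered
      if "others" == "others" && !(ordered.contains file) then ordered ++ [file] else ordered)
    = fun (ordered : List String) file =>
        if PySem.Str.isIn "others" file then ordered ++ [file]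
        else if ordered.contains file then ordered else ordered ++ [file] := by
  funext acc f
  cases h : PySem.Chars.isIn ['o', 't', 'h', 'e', 'r', 's'] f.toList
  · simp [h]
  · simp [h]

-- A's "others" pass equals B's final seen-set pass, given the membership invariant
theorem pv_phase2 (files : List String) (acc : List String) (seen : PySem.Set String)
    (hinv : ∀ f : String, PySem.Str.isIn "others" f = false → (f ∈ seen ↔ f ∈ acc)) :
    files.foldl (fun (ordered : List String) file =>
        if PySem.Str.isIn "others" file then ordered ++ [file]
        else if ordered.contains file then ordered else ordered ++ [file]) acc
    = (files.foldl (fun (p : List String × PySem.Set String) file =>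
        if PySem.Str.isIn "others" file then (p.1 ++ [file], p.2)
        else if p.2.contains file then p
        else (p.1 ++ [file], p.2.add file)) (acc, seen)).1 := by
  induction files generalizing acc seen with
  | nil => rfl
  | cons file rest ih =>
    rw [List.foldl_cons, List.foldl_cons]
    by_cases h : PySem.Str.isIn "others" file = true
    · rw [if_pos h, if_pos h]
      apply ih
      intro f hf
      have hne : f ≠ file := by
        intro he; rw [he, h] at hf; exact Bool.true_eq_false.mp hf
      simp [hinv f hf, hne]
    · have h' : PySem.Str.isIn "others" file = false := by simpa using h
      have hiff := hinv file h'
      rw [if_neg h, if_neg h]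
      by_cases hc : seen.contains file = true
      · have hm : file ∈ acc := hiff.mp ((PySem.Set.contains_iff _ _).mp hc)
        rw [if_pos hc, if_pos (show acc.contains file = true by simpa using hm)]
        exact ih acc seen hinv
      · have hnm : file ∉ acc := fun hm =>
          hc ((PySem.Set.contains_iff _ _).mpr (hiff.mpr hm))
        rw [if_neg hc, if_neg (show ¬ acc.contains file = true by simpa using hnm)]
        apply ih
        intro f hf
        rw [PySem.Set.mem_add, hinv f hf, List.mem_append, List.mem_singleton]

-- ===== VERDICT (by name: the statement is the Claim_ definition above) =====
theorem order_files_spec : Claim_equal_order_files := by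
  intro files _
  unfold Spec_order_files order_files order_files_alt
  simp only [List.foldl]
  rw [pv_phase1 "config" (by decide), pv_phase1 "init" (by decide),
      pv_phase1 "functions" (by decide), pv_phase1 "product" (by decide),
      pv_phase1 "camera" (by decide)]
  rw [pv_bucket "config" (by decide), pv_bucket "init" (by decide),
      pv_bucket "functions" (by decide), pv_bucket "product" (by decide),
      pv_bucket "camera" (by decide)]
  simp only [PySem.Dict.getD_insert_self]
  rw [pv_stepA_eq]
  apply pv_phase2
  intro f _
  exact PySem.Set.mem_ofList _ _
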